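-- pv_equiv track=rewrite | github.com/raycoffee/selenium-news-outlet | src/analyzer.py | find_repeated_words
-- ===== SOURCE A (Python) =====
-- def find_repeated_words(article_titles):
--     word_frequency = {}
--
--     for title in article_titles:
--         for word in title.split():
--             cleaned_word = "".join(char for char in word if char.isalnum()).lower()
--
--
--             if cleaned_word:
--
--                 word_frequency[cleaned_word] = word_frequency.get(cleaned_word, 0) + 1
--
--     frequent_words = {
--         word: count
--         for word, count in word_frequency.items()
--         if count > 2
--     }
--
--     return frequent_words
-- ===== SOURCE B (Python) =====
-- def find_repeated_words(article_titles):
--     words = [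
--         cleaned
--         for title in article_titles
--         for cleaned in ("".join(c for c in word if c.isalnum()).lower()
--                         for word in title.split())
--         if cleaned
--     ]
--     counts = {}
--     prev = None
--     run = 0
--     for w in sorted(words):
--         if w == prev:
--             run += 1
--         else:
--             if prev is not None:
--                 counts[prev] = run
--             prev, run = w, 1
--     if prev is not None:
--         counts[prev] = run
--     return {w: counts[w] for w in dict.fromkeys(words) if counts[w] > 2}
-- ===== Notes on version B (the rewrite author's own statement) =====
-- stated objective: alternative
-- what changed: Replaces hash-style incremental frequency counting with sort-then-group: the flat list of cleaned words is sorted and counts are read off as run lengths of consecutive equal words, then the result is emitted in first-occurrence order.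
import Mathlib
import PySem

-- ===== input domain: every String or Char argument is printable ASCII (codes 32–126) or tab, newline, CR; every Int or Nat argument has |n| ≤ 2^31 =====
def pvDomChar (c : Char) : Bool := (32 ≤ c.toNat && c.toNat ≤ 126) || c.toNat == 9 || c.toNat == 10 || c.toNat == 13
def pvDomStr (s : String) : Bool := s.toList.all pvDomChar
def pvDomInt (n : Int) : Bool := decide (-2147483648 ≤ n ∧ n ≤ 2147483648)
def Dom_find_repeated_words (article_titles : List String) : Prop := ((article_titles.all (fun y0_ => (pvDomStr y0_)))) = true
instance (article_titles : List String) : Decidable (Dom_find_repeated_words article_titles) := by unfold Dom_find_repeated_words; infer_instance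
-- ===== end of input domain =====

-- B replaces the incrementally maintained frequency dict by sort-then-group counting:
-- the flat cleaned-word list is sorted, counts are run lengths of consecutive equal
-- words, and the result is emitted in first-occurrence order; alternative, not faster.

-- ===== PORT A =====
def find_repeated_words (article_titles : List String) : List (String × Int) :=
  let word_frequency : PySem.Dict String Int :=
    article_titles.foldl (fun acc title =>
      (PySem.Str.split₀ title).foldl (fun wf word =>
        let cleaned_word : String :=
          String.ofList (PySem.Chars.lower (word.toList.filter PySem.Str.isalnum))
        if cleaned_word.toList ≠ [] then
          wf.insert cleaned_word (wf.getD cleaned_word 0 + 1)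
        else wf) acc) PySem.Dict.empty
  word_frequency.items.filter (fun p => p.2 > 2)

-- ===== PORT B =====
def find_repeated_words_alt (article_titles : List String) : List (String × Int) :=
  let words : List String :=
    article_titles.flatMap (fun title =>
      ((PySem.Str.split₀ title).map (fun word =>
        String.ofList (PySem.Chars.lower (word.toList.filter PySem.Str.isalnum)))).filter
        (fun cleaned => cleaned.toList ≠ []))
  -- the grouping loop over sorted(words); state = (counts, prev : Option String, run)
  let st : PySem.Dict String Int × Option String × Int :=
    (PySem.List.sorted words (fun x => x) false).foldl
      (fun st w =>
        if some w == st.2.1 then (st.1, st.2.1, st.2.2 + 1)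
        else
          match st.2.1 with
          | some p => (st.1.insert p st.2.2, some w, 1)
          | none => (st.1, some w, 1))
      (PySem.Dict.empty, none, 0)
  let counts : PySem.Dict String Int :=
    match st.2.1 with
    | some p => st.1.insert p st.2.2
    | none => st.1
  -- counts[w] in Python: w ∈ words there, so the key is present and getD w 0 is exact
  ((PySem.List.dedup words).filter (fun w => counts.getD w 0 > 2)).map
    (fun w => (w, counts.getD w 0))

-- ===== PRECONDITION & SPEC =====
def Spec_find_repeated_words (article_titles : List String) (out : List (String × Int)) : Prop := out = find_repeated_words_alt article_titles
instance (article_titles : List String) (out : List (String × Int)) : Decidable (Spec_find_repeated_words article_titles out) := by unfold Spec_find_repeated_words; infer_instance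

-- ===== CLAIM (what is proved, stated in full; the proofs are below) =====
def Claim_equal_find_repeated_words : Prop := ∀ (article_titles : List String), Dom_find_repeated_words article_titles → Spec_find_repeated_words article_titles (find_repeated_words article_titles)

-- ===== LEMMAS AND PROOFS =====

-- proof-only abbreviations for the shared cleaning step and the per-title word list
def pvClean (word : String) : String :=
  String.ofList (PySem.Chars.lower (word.toList.filter PySem.Str.isalnum))

def pvWordsOf (title : String) : List String :=
  ((PySem.Str.split₀ title).map pvClean).filter (fun c => c.toList ≠ [])

-- B's grouping step and finalizer, named for the proofs
def pvStep (st : PySem.Dict String Int × Option String × Int) (w : String) :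
    PySem.Dict String Int × Option String × Int :=
  if some w == st.2.1 then (st.1, st.2.1, st.2.2 + 1)
  else
    match st.2.1 with
    | some p => (st.1.insert p st.2.2, some w, 1)
    | none => (st.1, some w, 1)

def pvFin (st : PySem.Dict String Int × Option String × Int) : PySem.Dict String Int :=
  match st.2.1 with
  | some p => st.1.insert p st.2.2
  | none => st.1

-- run-length grouping over a sorted tail counts every element exactly once
theorem pvGroupInv (l : List String) (w : String) :
    ∀ (d : PySem.Dict String Int) (p : String) (r : Int),
      l.Pairwise (· ≤ ·) → (∀ x ∈ l, p ≤ x) → (∀ q, p ≤ q → d.getD q 0 = 0) →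
      (pvFin (l.foldl pvStep (d, some p, r))).getD w 0
        = (d.insert p r).getD w 0 + l.count w := by
  induction l with
  | nil => intro d p r _ _ _; simp [pvFin]
  | cons x t ih =>
    intro d p r hpw hle hd
    have hpx : p ≤ x := hle x (by simp)
    by_cases hxp : x = p
    · subst hxp
      rw [List.foldl_cons, show pvStep (d, some x, r) x = (d, some x, r + 1) by
        simp [pvStep]]
      rw [ih d x (r + 1) hpw.of_cons (fun y hy => (List.pairwise_cons.mp hpw).1 y hy) hd]
      simp only [PySem.Dict.getD_insert, List.count_cons]
      by_cases hwx : w = x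
      · simp only [hwx, BEq.rfl, if_pos]
        push_cast; ring
      · have hb : (w == x) = false := by simp [hwx]
        simp [hwx]
        exact fun h => hwx h.symm
    · have hpltx : p < x := lt_of_le_of_ne hpx (fun h => hxp h.symm)
      rw [List.foldl_cons, show pvStep (d, some p, r) x = (d.insert p r, some x, 1) by
        simp [pvStep, hxp]]
      have hd' : ∀ q, x ≤ q → (d.insert p r).getD q 0 = 0 := by
        intro q hq
        rw [PySem.Dict.getD_insert]
        have : q ≠ p := fun h => absurd (h ▸ hq) (not_le.mpr hpltx)
        simp [this, hd q (le_of_lt (lt_of_lt_of_le hpltx hq))]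
      rw [ih (d.insert p r) x 1 hpw.of_cons (fun y hy => (List.pairwise_cons.mp hpw).1 y hy) hd']
      have h0 := hd' x le_rfl
      rw [PySem.Dict.getD_insert] at h0
      simp only [if_neg hxp] at h0
      simp only [PySem.Dict.getD_insert, List.count_cons]
      by_cases hwx : w = x
      · subst hwx
        simp [hxp, h0]
        ring
      · have hb : (w == x) = false := by simp [hwx]
        simp [hwx]
        exact fun h => hwx h.symm

-- the run-length fold over any sorted list yields exactly the multiset counts
theorem pvGroupCounts (l : List String) (hs : l.Pairwise (· ≤ ·)) (w : String) :
    (pvFin (l.foldl pvStep (PySem.Dict.empty, none, 0))).getD w 0 = l.count w := by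
  cases l with
  | nil => simp [pvFin]
  | cons x t =>
    rw [List.foldl_cons, show pvStep (PySem.Dict.empty, none, 0) x
        = (PySem.Dict.empty, some x, 1) by simp [pvStep]]
    rw [pvGroupInv t w PySem.Dict.empty x 1 hs.of_cons (fun y hy => (List.pairwise_cons.mp hs).1 y hy)
        (fun q _ => by simp)]
    rw [PySem.Dict.getD_insert, List.count_cons]
    by_cases hwx : w = x
    · simp [hwx]
      push_cast; ring
    · have hb : (w == x) = false := by simp [hwx]
      simp [hwx]
      exact fun h => hwx h.symm

-- the inner loop of A over one title counts exactly the cleaned non-empty words of that title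
theorem pvInner (t : String) (d : PySem.Dict String Int) :
    (PySem.Str.split₀ t).foldl (fun wf word =>
        let c := String.ofList (PySem.Chars.lower (word.toList.filter PySem.Str.isalnum))
        if c.toList ≠ [] then wf.insert c (wf.getD c 0 + 1) else wf) d
    = (pvWordsOf t).foldl (fun wf c => wf.insert c (wf.getD c 0 + 1)) d := by
  show (PySem.Str.split₀ t).foldl (fun wf word =>
        let c := pvClean word
        if c.toList ≠ [] then wf.insert c (wf.getD c 0 + 1) else wf) d = _
  have h1 := (List.foldl_map (f := pvClean)
      (g := fun (wf : PySem.Dict String Int) (c : String) =>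
        if c.toList ≠ [] then wf.insert c (wf.getD c 0 + 1) else wf)
      (l := PySem.Str.split₀ t) (init := d)).symm
  rw [pvWordsOf, h1, PySem.List.foldl_ite_eq_foldl_filter]

theorem find_repeated_words_eq (article_titles : List String) :
    find_repeated_words article_titles = find_repeated_words_alt article_titles := by
  unfold find_repeated_words find_repeated_words_alt
  simp only [pvInner]
  rw [← List.foldl_flatMap (f := pvWordsOf)]
  rw [show (article_titles.flatMap pvWordsOf).foldl
        (fun wf c => wf.insert c (wf.getD c 0 + 1)) PySem.Dict.empty
      = PySem.Dict.counter (article_titles.flatMap pvWordsOf) from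
      PySem.Dict.foldl_insert_getD_add_one_eq_counter _]
  set ws := article_titles.flatMap pvWordsOf with hws
  have hcnt : ∀ w, (pvFin ((PySem.List.sorted ws (fun x => x) false).foldl pvStep
      (PySem.Dict.empty, none, 0))).getD w 0 = (ws.count w : Int) := by
    intro w
    rw [pvGroupCounts _ (PySem.List.sorted_pairwise ws (fun x => x)) w,
        (PySem.List.sorted_perm ws (fun x => x) false).count_eq]
  show (PySem.Dict.counter ws).items.filter (fun p => p.2 > 2) = _
  rw [PySem.Dict.items_counter, ← PySem.List.dedup_eq_ofList, List.filter_map]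
  show _ = ((PySem.List.dedup ws).filter fun w =>
      (pvFin ((PySem.List.sorted ws (fun x => x) false).foldl pvStep
        (PySem.Dict.empty, none, 0))).getD w 0 > 2).map fun w =>
      (w, (pvFin ((PySem.List.sorted ws (fun x => x) false).foldl pvStep
        (PySem.Dict.empty, none, 0))).getD w 0)
  simp only [hcnt]
  rfl

-- ===== VERDICT (by name: the statement is the Claim_ definition above) =====
theorem find_repeated_words_spec : Claim_equal_find_repeated_words := by
  intro ts _
  unfold Spec_find_repeated_words
  exact find_repeated_words_eq ts
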